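-- pv_equiv track=rewrite | github.com/kgirtz/AdventOfCode | AoC2018/Day 12/Day 12.py | sum_of_pots
-- ===== SOURCE A (Python) =====
-- def sum_of_pots(pots: int, lsb_position: int) -> int:
--     total: int = 0
--     bit: int = lsb_position
--     while pots:
--         if pots & 1:
--             total += bit
--         bit += 1
--         pots >>= 1
--     return total
-- ===== SOURCE B (Python) =====
-- def sum_of_pots(pots: int, lsb_position: int) -> int:
--     # Iterate only over the set bits, stripping the lowest set bit each turn.
--     total = 0
--     while pots:
--         low = pots & -pots
--         total += lsb_position + (low.bit_length() - 1)
--         pots &= pots - 1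
--     return total
-- ===== Notes on version B (the rewrite author's own statement) =====
-- stated objective: alternative
-- what changed: Instead of shifting through every bit with a running bit counter and a per-bit conditional, B keeps the mask itself and loops only over set bits, clearing the lowest one with pots &= pots-1 and reading its position via the lowest-set-bit's bit_length.
import Mathlib
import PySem

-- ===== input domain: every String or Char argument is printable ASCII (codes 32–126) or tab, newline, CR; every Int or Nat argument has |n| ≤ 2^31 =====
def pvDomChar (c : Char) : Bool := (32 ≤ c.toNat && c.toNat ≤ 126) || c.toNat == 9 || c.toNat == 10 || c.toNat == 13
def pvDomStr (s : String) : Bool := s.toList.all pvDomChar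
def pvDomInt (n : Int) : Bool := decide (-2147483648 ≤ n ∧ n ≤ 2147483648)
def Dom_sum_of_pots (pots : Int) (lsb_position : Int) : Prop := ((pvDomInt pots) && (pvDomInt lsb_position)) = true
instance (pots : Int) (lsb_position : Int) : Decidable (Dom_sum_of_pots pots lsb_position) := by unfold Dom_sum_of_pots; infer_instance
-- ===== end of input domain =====

-- B iterates only over the set bits (clearing the lowest set bit each turn) instead of
-- shifting through every bit position. On pots < 0 both Pythons loop forever; the ports
-- (via toNat) return there, and they still agree, so no precondition is needed.


-- ===== PORT A =====
-- The while loop of A on the nonnegative pots where Python A terminates (>> and & 1 agree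
-- with Nat division/parity there): test low bit, advance bit counter, shift right.
def sopLoopA (p : Nat) (bit : Int) (total : Int) : Int :=
  if p = 0 then total
  else sopLoopA (p / 2) (bit + 1) (total + if p % 2 = 1 then bit else 0)
  decreasing_by exact Nat.div_lt_self (Nat.pos_of_ne_zero (by assumption)) (by omega)

def sum_of_pots (pots : Int) (lsb_position : Int) : Int :=
  sopLoopA pots.toNat lsb_position 0

-- ===== PORT B =====
-- The while loop of B on nonnegative pots: low = p & -p equals p - (p &&& (p-1)) in Nat, and
-- low.bit_length() - 1 = Nat.log2 low for low ≥ 1; clear the lowest set bit with p &&& (p-1).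
def sopLoopB (p : Nat) (lsb_position : Int) (total : Int) : Int :=
  if h : p = 0 then total
  else sopLoopB (p &&& (p - 1)) lsb_position
        (total + (lsb_position + Int.ofNat (Nat.log2 (p - (p &&& (p - 1))))))
  decreasing_by
    exact Nat.lt_of_le_of_lt Nat.and_le_right (Nat.sub_lt (Nat.pos_of_ne_zero h) one_pos)

def sum_of_pots_alt (pots : Int) (lsb_position : Int) : Int :=
  sopLoopB pots.toNat lsb_position 0

-- ===== PRECONDITION & SPEC =====
def Spec_sum_of_pots (pots : Int) (lsb_position : Int) (out : Int) : Prop := out = sum_of_pots_alt pots lsb_position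
instance (pots : Int) (lsb_position : Int) (out : Int) : Decidable (Spec_sum_of_pots pots lsb_position out) := by unfold Spec_sum_of_pots; infer_instance

-- ===== CLAIM (what is proved, stated in full; the proofs are below) =====
def Claim_equal_sum_of_pots : Prop := ∀ (pots : Int) (lsb_position : Int), Dom_sum_of_pots pots lsb_position → Spec_sum_of_pots pots lsb_position (sum_of_pots pots lsb_position)

-- ===== LEMMAS AND PROOFS =====

-- Nat.log2 of a doubled number, used to track the lowest set bit through a halving step.
theorem sop_log2_two_mul (x : Nat) (h : x ≠ 0) : Nat.log2 (2*x) = Nat.log2 x + 1 := by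
  rw [Nat.log2_eq_log_two, Nat.log2_eq_log_two, mul_comm, Nat.log_mul_base (by norm_num) h]

-- For odd p, p &&& (p-1) just clears the low bit.
theorem sop_and_pred_odd (p : Nat) (h : p % 2 = 1) : p &&& (p - 1) = p - 1 := by
  obtain ⟨k, rfl⟩ : ∃ k, p = 2*k+1 := ⟨p/2, by omega⟩
  rw [(by omega : 2*k+1-1 = 2*k)]
  apply Nat.eq_of_testBit_eq
  intro i
  rw [Nat.testBit_and]
  cases i with
  | zero => simp
  | succ i => simp [Nat.testBit_succ, (by omega : (2*k+1)/2 = k), (by omega : (2*k)/2 = k)]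

-- Clearing the lowest set bit commutes with doubling.
theorem sop_and_pred_two_mul (q : Nat) (h : q ≠ 0) :
    (2 * q) &&& (2 * q - 1) = 2 * (q &&& (q - 1)) := by
  rw [(by omega : 2*q-1 = 2*(q-1)+1)]
  apply Nat.eq_of_testBit_eq
  intro i
  rw [Nat.testBit_and]
  cases i with
  | zero => simp
  | succ i => simp [Nat.testBit_succ, (by omega : (2*q)/2 = q), (by omega : (2*(q-1)+1)/2 = q-1),
      (by omega : (2*(q &&& (q-1)))/2 = q &&& (q-1)), Nat.testBit_and]

theorem sop_loopB_even (q : Nat) (lsb total : Int) :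
    sopLoopB (2 * q) lsb total = sopLoopB q (lsb + 1) total := by
  induction q using Nat.strong_induction_on generalizing total with
  | _ q ih =>
    rcases Nat.eq_zero_or_pos q with h | h
    · subst h; rw [sopLoopB]; simp; rw [sopLoopB]; simp
    · have hq : q ≠ 0 := by omega
      have hq' : q &&& (q-1) ≤ q - 1 := Nat.and_le_right
      rw [sopLoopB]
      rw [dif_neg (by omega : ¬ 2*q = 0)]
      rw [sop_and_pred_two_mul q hq]
      rw [(by omega : 2*q - 2*(q &&& (q-1)) = 2*(q - (q &&& (q-1))))]
      rw [sop_log2_two_mul _ (by omega)]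
      rw [ih (q &&& (q-1)) (by omega)]
      conv_rhs => rw [sopLoopB, dif_neg hq]
      congr 1
      simp only [Int.ofNat_eq_natCast]
      push_cast
      ring

-- The two loops agree: stripping the lowest set bit (with its log2 offset) visits the same
-- set-bit positions as shifting through every bit.
theorem sop_loop_eq (p : Nat) (lsb total : Int) :
    sopLoopB p lsb total = sopLoopA p lsb total := by
  induction p using Nat.strong_induction_on generalizing lsb total with
  | _ p ih =>
    rcases Nat.eq_zero_or_pos p with h | h
    · subst h; rw [sopLoopB, sopLoopA]; simp
    · have hp : p ≠ 0 := by omega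
      rcases Nat.even_or_odd p with he | ho
      · obtain ⟨q, hq⟩ := he
        have hq2 : p = 2*q := by omega
        subst hq2
        rw [sop_loopB_even, ih q (by omega)]
        conv_rhs => rw [sopLoopA, if_neg hp, (by omega : (2*q)/2 = q), (by omega : (2*q) % 2 = 0)]
        simp
      · obtain ⟨k, hk⟩ := ho
        subst hk
        rw [sopLoopB, dif_neg hp]
        rw [sop_and_pred_odd _ (by omega), (by omega : 2*k+1-1 = 2*k),
            (by omega : 2*k+1 - 2*k = 1)]
        have h1 : Nat.log2 1 = 0 := by decide
        rw [h1, sop_loopB_even, ih k (by omega)]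
        conv_rhs => rw [sopLoopA, if_neg hp, (by omega : (2*k+1)/2 = k), (by omega : (2*k+1) % 2 = 1)]
        simp

-- ===== VERDICT (by name: the statement is the Claim_ definition above) =====
theorem sum_of_pots_spec : Claim_equal_sum_of_pots := by
  intro pots lsb _
  unfold Spec_sum_of_pots sum_of_pots sum_of_pots_alt
  exact (sop_loop_eq _ _ _).symm
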